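-- pv_equiv track=rewrite | github.com/P69544/Time2Code-Answers | Level 7/Tweet/Tweet/Tweet.py | tweets
-- ===== SOURCE A (Python) =====
-- def tweets(message, num_chars):
--     messagesList = []
--     msg = ""
--
--     for count in range(len(message)):
--         msg += message[count]
--         if (count+1) % num_chars == 0:
--             messagesList.append(msg)
--             msg = ""
--     if msg != "":
--         messagesList.append(msg)
--     return messagesList
-- ===== SOURCE B (Python) =====
-- def tweets(message, num_chars):
--     # compute chunk boundaries directly: stride num_chars over the start indices
--     return [message[i:i + num_chars] for i in range(0, len(message), num_chars)]
-- ===== Notes on version B (the rewrite author's own statement) =====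
-- stated objective: simpler
-- what changed: B slices the message at computed chunk boundaries (a strided range of start indices) instead of A's character-by-character scan with a running buffer, modulo counter and quadratic string concatenation.
-- outside the precondition, e.g. on tweets('abc', -2): A returns ['ab', 'c'], B returns []; on tweets('', 0): A returns [], B raises ValueError
import Mathlib
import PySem

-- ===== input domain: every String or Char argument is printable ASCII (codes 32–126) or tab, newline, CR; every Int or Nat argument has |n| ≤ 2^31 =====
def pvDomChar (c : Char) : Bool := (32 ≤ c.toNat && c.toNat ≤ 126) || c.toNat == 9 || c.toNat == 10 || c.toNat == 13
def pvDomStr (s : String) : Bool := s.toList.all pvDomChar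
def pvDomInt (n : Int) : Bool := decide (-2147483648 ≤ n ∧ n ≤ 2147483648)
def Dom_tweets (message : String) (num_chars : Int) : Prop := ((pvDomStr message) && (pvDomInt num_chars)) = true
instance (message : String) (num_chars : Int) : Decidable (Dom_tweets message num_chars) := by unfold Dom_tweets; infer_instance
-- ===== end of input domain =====

-- B slices the message at computed chunk boundaries (a strided range of start indices)
-- instead of A's character-by-character scan with a running buffer and a modulo counter.

-- ===== PORT A =====
-- one loop iteration: msg += message[count]; if (count+1) % num_chars == 0: flush msg into the list
-- (the running string msg is carried as a List Char; output strings are built with String.ofList)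
def tweetsStep (num_chars : Int) (s : List String × List Char) (p : Int × Char) : List String × List Char :=
  let msg := s.2 ++ [p.2]
  if PySem.Int.mod (p.1 + 1) num_chars == 0 then (s.1 ++ [String.ofList msg], ([] : List Char))
  else (s.1, msg)

-- the trailing 'if msg != "": messagesList.append(msg)'
def tweetsFinish (r : List String × List Char) : List String :=
  if r.2 ≠ [] then r.1 ++ [String.ofList r.2] else r.1

def tweets (message : String) (num_chars : Int) : List String :=
  tweetsFinish ((PySem.List.enumerate message.toList 0).foldl (tweetsStep num_chars) ([], []))

-- ===== PORT B =====
def tweets_alt (message : String) (num_chars : Int) : List String :=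
  (PySem.List.pyRange 0 (PySem.Str.len message) num_chars).map
    (fun i => PySem.Str.slice message (some i) (some (i + num_chars)))

-- ===== PRECONDITION & SPEC =====
-- Pre_ excludes num_chars = 0 (A raises ZeroDivisionError on a nonempty message, and B's range(0,0,0)
-- raises ValueError even on the empty one) and negative num_chars with a nonempty message, a corner
-- outside the function's natural domain where A's modulo test chunks by |num_chars| while B's strided
-- range is empty — both values are accidents and neither is the specified one.
def Pre_tweets (message : String) (num_chars : Int) : Prop :=
  1 ≤ num_chars ∨ (message = "" ∧ num_chars < 0)
instance (message : String) (num_chars : Int) : Decidable (Pre_tweets message num_chars) := by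
  unfold Pre_tweets; infer_instance

def pvWitness_tweets : String × Int := ("hello world", 4)

def Spec_tweets (message : String) (num_chars : Int) (out : List String) : Prop := out = tweets_alt message num_chars
instance (message : String) (num_chars : Int) (out : List String) : Decidable (Spec_tweets message num_chars out) := by unfold Spec_tweets; infer_instance

-- ===== CLAIM (what is proved, stated in full; the proofs are below) =====
def Claim_equal_tweets : Prop := ∀ (message : String) (num_chars : Int), Dom_tweets message num_chars → Pre_tweets message num_chars → Spec_tweets message num_chars (tweets message num_chars)

-- ===== LEMMAS AND PROOFS =====

-- chunks of size m+1 of a character list: the common normal form of both ports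
def chunksP (m : Nat) : List Char → List (List Char)
  | [] => []
  | c :: rest => ((c :: rest).take (m + 1)) :: chunksP m ((c :: rest).drop (m + 1))
  termination_by cs => cs.length
  decreasing_by simp

lemma chunksP_ne_nil (m : Nat) (cs : List Char) (h : cs ≠ []) :
    chunksP m cs = cs.take (m + 1) :: chunksP m (cs.drop (m + 1)) := by
  cases cs with
  | nil => exact absurd rfl h
  | cons c rest => rw [chunksP.eq_def]

lemma pyRange_pos_nil (a b s : Int) (hs : 0 < s) (h : b ≤ a) :
    PySem.List.pyRange a b s = [] := by
  rw [PySem.List.pyRange_of_pos a b hs, if_neg (not_lt.2 h)]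
  simp

lemma pyRange_pos_cons (a b s : Int) (hs : 0 < s) (h : a < b) :
    PySem.List.pyRange a b s = a :: PySem.List.pyRange (a + s) b s := by
  rw [PySem.List.pyRange_of_pos a b hs, PySem.List.pyRange_of_pos (a + s) b hs, if_pos h]
  have hstep : (b - a + s - 1) / s = (b - (a + s) + s - 1) / s + 1 := by
    have := Int.add_mul_ediv_right (b - a - 1) 1 (ne_of_gt hs)
    have heq : b - a + s - 1 = b - a - 1 + 1 * s := by ring
    have heq2 : b - (a + s) + s - 1 = b - a - 1 := by ring
    rw [heq, heq2, this]
  have hcount : ((b - a + s - 1) / s).toNat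
      = (if a + s < b then ((b - (a + s) + s - 1) / s).toNat else 0) + 1 := by
    by_cases hab : a + s < b
    · rw [if_pos hab]
      have h0 : 0 ≤ (b - (a + s) + s - 1) / s := Int.ediv_nonneg (by omega) hs.le
      omega
    · rw [if_neg hab]
      have h0 : (b - (a + s) + s - 1) / s = 0 := Int.ediv_eq_zero_of_lt (by omega) (by omega)
      omega
  rw [hcount, List.range_succ_eq_map]
  simp only [List.map_cons, List.map_map, Nat.cast_zero, mul_zero, add_zero]
  congr 1
  apply List.map_congr_left
  intro k _
  simp [Function.comp]
  ring

-- B's strided-range-of-slices loop computes the chunks, from any start offset a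
lemma B_chunks (n : Int) (hn : 1 ≤ n) (cs : List Char) : ∀ (k a : Nat), cs.length - a ≤ k →
    (PySem.List.pyRange (a : Int) (cs.length : Int) n).map
        (fun i => PySem.List.slice cs (some i) (some (i + n)))
      = chunksP (n.toNat - 1) (cs.drop a) := by
  intro k
  induction k with
  | zero =>
    intro a ha
    rw [pyRange_pos_nil _ _ _ (by omega) (by exact_mod_cast (by omega : cs.length ≤ a))]
    rw [List.drop_eq_nil_of_le (by omega)]
    simp [chunksP]
  | succ k ih =>
    intro a ha
    by_cases hlt : a < cs.length
    · rw [pyRange_pos_cons _ _ _ (by omega) (by exact_mod_cast hlt)]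
      have hn' : n = (n.toNat : Int) := by omega
      have hslice : PySem.List.slice cs (some (a : Int)) (some ((a : Int) + n))
          = (cs.drop a).take n.toNat := by
        rw [hn']; exact_mod_cast PySem.List.slice_natCast_add cs a n.toNat
      have hcast : (a : Int) + n = ((a + n.toNat : Nat) : Int) := by push_cast; omega
      have hne : cs.drop a ≠ [] := by simp [List.drop_eq_nil_iff]; omega
      have hm : n.toNat - 1 + 1 = n.toNat := by omega
      rw [List.map_cons, hslice, hcast, ih (a + n.toNat) (by omega),
          chunksP_ne_nil (n.toNat - 1) (cs.drop a) hne, hm, List.drop_drop]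
    · rw [pyRange_pos_nil _ _ _ (by omega) (by exact_mod_cast (by omega : cs.length ≤ a))]
      rw [List.drop_eq_nil_of_le (by omega)]
      simp [chunksP]

-- A's scan, from any position: if the buffer length equals the position mod num_chars,
-- finishing the fold yields the chunks of buffer ++ remaining input
lemma A_loop (n : Int) (hn : 1 ≤ n) :
    ∀ (cs : List Char) (i : Int) (out : List String) (buf : List Char),
      0 ≤ i → PySem.Int.mod i n = (buf.length : Int) → (buf.length : Int) < n →
      tweetsFinish ((PySem.List.enumerate cs i).foldl (tweetsStep n) (out, buf))
        = out ++ (chunksP (n.toNat - 1) (buf ++ cs)).map String.ofList := by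
  intro cs
  induction cs with
  | nil =>
    intro i out buf _ _ hblt
    by_cases hb : buf = []
    · subst hb
      simp [PySem.List.enumerate, tweetsFinish, chunksP]
    · simp only [PySem.List.enumerate, List.foldl_nil, List.append_nil]
      rw [tweetsFinish, if_pos hb, chunksP_ne_nil _ _ hb]
      have ht : buf.take (n.toNat - 1 + 1) = buf := List.take_of_length_le (by omega)
      have hd : buf.drop (n.toNat - 1 + 1) = [] := List.drop_eq_nil_of_le (by omega)
      rw [ht, hd]
      simp [chunksP]
  | cons c rest ih =>
    intro i out buf hi hb hblt
    have hmod : PySem.Int.mod i n = i % n := PySem.Int.mod_eq_emod_of_pos (by omega)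
    have hmod1 : PySem.Int.mod (i + 1) n = (i + 1) % n := PySem.Int.mod_eq_emod_of_pos (by omega)
    have hib : i % n = (buf.length : Int) := by rw [← hmod]; exact hb
    have hbm : (buf.length : Int) % n = (buf.length : Int) :=
      Int.emod_eq_of_lt (by positivity) hblt
    have hsucc : (i + 1) % n = ((buf.length : Int) + 1) % n := by
      rw [Int.add_emod i 1 n, hib]
      nth_rewrite 1 [← hbm]
      rw [← Int.add_emod]
    simp only [PySem.List.enumerate, List.foldl_cons]
    by_cases hfull : (buf.length : Int) + 1 = n
    · have hz : PySem.Int.mod (i + 1) n = 0 := by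
        rw [hmod1, hsucc, hfull, Int.emod_self]
      rw [show tweetsStep n (out, buf) (i, c) = (out ++ [String.ofList (buf ++ [c])], ([] : List Char)) from by
            simp [tweetsStep, hz]]
      rw [ih (i + 1) _ [] (by omega) (by simpa using hz) (by simp; omega)]
      rw [chunksP_ne_nil _ (buf ++ c :: rest) (by simp)]
      have hlenb : (buf ++ [c]).length = n.toNat := by simp; omega
      have hassoc : buf ++ c :: rest = (buf ++ [c]) ++ rest := by simp
      have hm : n.toNat - 1 + 1 = n.toNat := by omega
      rw [hassoc, hm, List.take_left' hlenb, List.drop_left' hlenb]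
      simp
    · have hnz : ¬ PySem.Int.mod (i + 1) n = 0 := by
        rw [hmod1, hsucc, Int.emod_eq_of_lt (by omega) (by omega)]
        omega
      rw [show tweetsStep n (out, buf) (i, c) = (out, buf ++ [c]) from by
            simp [tweetsStep]; intro hcon; exact absurd hcon hnz]
      rw [ih (i + 1) out (buf ++ [c]) (by omega)
            (by rw [hmod1, hsucc, Int.emod_eq_of_lt (by omega) (by omega)]; simp)
            (by simp; omega)]
      simp

-- ===== VERDICT (by name: the statement is the Claim_ definition above) =====
theorem tweets_spec : Claim_equal_tweets := by
  intro message n _ hpre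
  unfold Spec_tweets
  rcases hpre with hn | ⟨hmsg, hneg⟩
  · rw [tweets, A_loop n hn message.toList 0 [] [] le_rfl
        (by simp [PySem.Int.mod_eq_emod_of_pos (by omega : (0:Int) < n)]) (by simp; omega)]
    rw [tweets_alt]
    simp only [PySem.Str.len_eq, List.nil_append]
    have hB := B_chunks n hn message.toList message.toList.length 0 (by omega)
    simp only [Nat.cast_zero, List.drop_zero] at hB
    rw [← hB, List.map_map]
    apply List.map_congr_left
    intro i _
    simp [PySem.Str.slice, Function.comp]
  · subst hmsg
    rw [tweets, tweets_alt]
    have h0 : PySem.Str.len "" = 0 := by decide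
    rw [h0]
    have hr : PySem.List.pyRange 0 0 n = [] := by
      unfold PySem.List.pyRange
      split_ifs <;> simp_all
    rw [hr]
    simp [tweetsFinish]
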